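-- pv_equiv track=rewrite | github.com/Adelin010/PythonProj | Erfordnis6.py | erford6
-- ===== SOURCE A (Python) =====
-- def is_domino(num1: int, num2: int) -> bool:
--     return (num1 % 10 == (num2//10) % 10)
--
-- def erford6(arr: list[int])-> tuple:
--     l, l_max = 1, 0
--     sol: list[int] = []
--     temp: list[int] = [arr[0]]
--     for idx in range(1, len(arr)):
--         if is_domino(arr[idx-1], arr[idx]):
--             l += 1
--             temp[len(temp):] = [arr[idx]]
--         else :
--             if l > l_max:
--                 l_max = l
--                 sol = temp
--             l = 1
--             temp = [arr[idx]]
--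
--     if l > l_max:
--         l_max = l
--         sol = temp
--     return (sol, l_max)
-- ===== SOURCE B (Python) =====
-- def is_domino(num1: int, num2: int) -> bool:
--     return (num1 % 10 == (num2//10) % 10)
--
-- def erford6(arr: list[int]) -> tuple:
--     # collect-then-select: partition arr into maximal domino runs, then pick
--     # the first longest run (max with key=len is first-wins, like A's strict >)
--     segments = [[arr[0]]]
--     for x in arr[1:]:
--         if is_domino(segments[-1][-1], x):
--             segments[-1].append(x)
--         else:
--             segments.append([x])
--     best = max(segments, key=len)
--     return (best, len(best))
-- ===== Notes on version B (the rewrite author's own statement) =====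
-- stated objective: alternative
-- what changed: Replaces A's inline best-so-far tracking (l, l_max, sol, temp with end-of-loop flush) by a two-pass collect-then-select: partition the list into maximal domino runs, then take the first longest run with max(key=len).
import Mathlib
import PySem

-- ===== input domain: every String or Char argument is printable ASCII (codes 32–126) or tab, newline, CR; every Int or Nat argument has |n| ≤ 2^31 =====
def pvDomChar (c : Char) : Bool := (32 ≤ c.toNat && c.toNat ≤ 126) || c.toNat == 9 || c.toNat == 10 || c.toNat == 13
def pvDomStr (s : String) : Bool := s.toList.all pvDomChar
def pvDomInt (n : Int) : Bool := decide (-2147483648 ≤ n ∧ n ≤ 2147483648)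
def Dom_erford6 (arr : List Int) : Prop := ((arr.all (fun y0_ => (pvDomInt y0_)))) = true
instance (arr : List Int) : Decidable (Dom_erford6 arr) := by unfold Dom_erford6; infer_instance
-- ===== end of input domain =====

-- B is an alternative two-pass decomposition (collect maximal domino runs, then select
-- the first longest); same O(n) cost. Both programs raise IndexError on [], excluded by Pre_.

-- ===== PORT A =====
def isDomino (num1 num2 : Int) : Bool :=
  PySem.Int.mod num1 10 == PySem.Int.mod (PySem.Int.floordiv num2 10) 10

-- A's for-loop over range(1, len(arr)): prev carries arr[idx-1]
def erford6Loop (prev l lmax : Int) (sol temp : List Int) : List Int → List Int × Int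
  | [] => if l > lmax then (temp, l) else (sol, lmax)
  | x :: rest =>
    if isDomino prev x then erford6Loop x (l + 1) lmax sol (temp ++ [x]) rest
    else if l > lmax then erford6Loop x 1 l temp [x] rest
    else erford6Loop x 1 lmax sol [x] rest

def erford6 (arr : List Int) : List Int × Int :=
  match arr with
  | [] => ([], 0)          -- arr[0] raises IndexError in Python; excluded by Pre_
  | x :: rest => erford6Loop x 1 0 [] [x] rest

-- ===== PORT B =====
-- first pass: partition into maximal domino runs (prev = last element of cur)
def segLoop (cur : List Int) (prev : Int) : List Int → List (List Int)
  | [] => [cur]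
  | x :: rest =>
    if isDomino prev x then segLoop (cur ++ [x]) x rest
    else cur :: segLoop [x] x rest

-- second pass: max(segments, key=len) — first segment of maximal length
def pickLongest : List (List Int) → List Int
  | [] => []
  | s :: rest => rest.foldl (fun b t => if t.length > b.length then t else b) s

def erford6_alt (arr : List Int) : List Int × Int :=
  match arr with
  | [] => ([], 0)          -- arr[0] raises IndexError in Python; excluded by Pre_
  | x :: rest =>
    let best := pickLongest (segLoop [x] x rest)
    (best, (best.length : Int))

-- ===== PRECONDITION & SPEC =====
-- Pre_: arr must be nonempty; on [] both A and B raise IndexError at arr[0].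
def Pre_erford6 (arr : List Int) : Prop := arr ≠ []
instance (arr : List Int) : Decidable (Pre_erford6 arr) := by unfold Pre_erford6; infer_instance
def pvWitness_erford6 : List Int := [12, 21, 14, 7]

def Spec_erford6 (arr : List Int) (out : List Int × Int) : Prop := out = erford6_alt arr
instance (arr : List Int) (out : List Int × Int) : Decidable (Spec_erford6 arr out) := by unfold Spec_erford6; infer_instance

-- ===== CLAIM (what is proved, stated in full; the proofs are below) =====
def Claim_equal_erford6 : Prop := ∀ (arr : List Int), Dom_erford6 arr → Pre_erford6 arr → Spec_erford6 arr (erford6 arr)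

-- ===== LEMMAS AND PROOFS =====

-- A's loop equals: fold B's segments of (temp, then rest) against current best sol
theorem erford6Loop_eq_fold (rest : List Int) : ∀ (prev : Int) (sol temp : List Int),
    erford6Loop prev (temp.length : Int) (sol.length : Int) sol temp rest =
      (let best := (segLoop temp prev rest).foldl
          (fun b t => if t.length > b.length then t else b) sol
       (best, (best.length : Int))) := by
  induction rest with
  | nil =>
    intro prev sol temp
    simp only [erford6Loop, segLoop, List.foldl]
    by_cases h : temp.length > sol.length
    · rw [if_pos (by exact_mod_cast h), if_pos h]
    · rw [if_neg (by exact_mod_cast h), if_neg h]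
  | cons x rest ih =>
    intro prev sol temp
    simp only [erford6Loop, segLoop]
    by_cases hd : isDomino prev x
    · rw [if_pos hd, if_pos hd]
      have hl : (temp.length : Int) + 1 = ((temp ++ [x]).length : Int) := by
        simp [List.length_append]
      rw [hl, ih]
    · rw [if_neg hd, if_neg hd]
      simp only [List.foldl]
      by_cases h : temp.length > sol.length
      · rw [if_pos (by exact_mod_cast h : (temp.length : Int) > (sol.length : Int)), if_pos h]
        have := ih x temp [x]
        simpa using this
      · rw [if_neg (by exact_mod_cast h : ¬ (temp.length : Int) > (sol.length : Int)), if_neg h]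
        have := ih x sol [x]
        simpa using this

-- segLoop always produces a first segment at least as long as cur (hence nonempty)
theorem segLoop_head (rest : List Int) : ∀ (cur : List Int) (prev : Int),
    ∃ s t, segLoop cur prev rest = s :: t ∧ cur.length ≤ s.length := by
  induction rest with
  | nil => intro cur prev; exact ⟨cur, [], rfl, le_refl _⟩
  | cons x rest ih =>
    intro cur prev
    simp only [segLoop]
    by_cases hd : isDomino prev x
    · rw [if_pos hd]
      obtain ⟨s, t, heq, hle⟩ := ih (cur ++ [x]) x
      exact ⟨s, t, heq, by simpa using Nat.le_of_succ_le (by simpa using hle)⟩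
    · rw [if_neg hd]
      exact ⟨cur, segLoop [x] x rest, rfl, le_refl _⟩

-- ===== VERDICT (by name: the statement is the Claim_ definition above) =====
theorem erford6_spec : Claim_equal_erford6 := by
  intro arr _ hpre
  unfold Spec_erford6
  match arr with
  | [] => exact absurd rfl hpre
  | x :: rest =>
    show erford6 (x :: rest) = erford6_alt (x :: rest)
    have h1 : erford6 (x :: rest) = erford6Loop x ([x].length : Int) (([] : List Int).length : Int) [] [x] rest := by
      simp [erford6]
    rw [h1, erford6Loop_eq_fold]
    obtain ⟨s, t, heq, hle⟩ := segLoop_head rest [x] x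
    simp only [erford6_alt, pickLongest, heq, List.foldl]
    have hs : s.length > ([] : List Int).length := by
      simp only [List.length_nil, gt_iff_lt]
      have h1 : ([x] : List Int).length = 1 := rfl
      omega
    rw [if_pos hs]
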